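-- pv_equiv track=rewrite | github.com/gutosolar72/nanosip | blueprints/relatorios.py | gerar_paginacao
-- ===== SOURCE A (Python) =====
-- def gerar_paginacao(page, total_pages, delta=2):
--     """
--     Gera uma lista de páginas inteligente:
--     - mostra primeira e última
--     - mostra páginas próximas da atual
--     - usa '...' quando necessário
--     """
--     pages = []
--     for p in range(1, total_pages + 1):
--         if (
--             p == 1 or
--             p == total_pages or
--             abs(p - page) <= delta
--         ):
--             pages.append(p)
--         else:
--             # coloca None para indicar "..."
--             if pages[-1] is not None:
--                 pages.append(None)
--     return pages
-- ===== SOURCE B (Python) =====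
-- def gerar_paginacao(page, total_pages, delta=2):
--     """O(delta) closed-form build: page 1, the clamped window around `page`,
--     the last page, with None inserted for each gap."""
--     if total_pages < 1:
--         return []
--     if total_pages == 1:
--         return [1]
--     lo = max(2, page - delta)
--     hi = min(total_pages - 1, page + delta)
--     out = [1]
--     if lo > hi:
--         if total_pages > 2:
--             out.append(None)
--     else:
--         if lo > 2:
--             out.append(None)
--         out.extend(range(lo, hi + 1))
--         if hi < total_pages - 1:
--             out.append(None)
--     out.append(total_pages)
--     return out
-- ===== Notes on version B (the rewrite author's own statement) =====
-- stated objective: faster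
-- what changed: Instead of scanning every page 1..total_pages and testing each against the window, B emits the result directly: page 1, the clamped window [page-delta, page+delta] ∩ [2, total_pages-1], and the last page, with a None inserted per gap.
import Mathlib
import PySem

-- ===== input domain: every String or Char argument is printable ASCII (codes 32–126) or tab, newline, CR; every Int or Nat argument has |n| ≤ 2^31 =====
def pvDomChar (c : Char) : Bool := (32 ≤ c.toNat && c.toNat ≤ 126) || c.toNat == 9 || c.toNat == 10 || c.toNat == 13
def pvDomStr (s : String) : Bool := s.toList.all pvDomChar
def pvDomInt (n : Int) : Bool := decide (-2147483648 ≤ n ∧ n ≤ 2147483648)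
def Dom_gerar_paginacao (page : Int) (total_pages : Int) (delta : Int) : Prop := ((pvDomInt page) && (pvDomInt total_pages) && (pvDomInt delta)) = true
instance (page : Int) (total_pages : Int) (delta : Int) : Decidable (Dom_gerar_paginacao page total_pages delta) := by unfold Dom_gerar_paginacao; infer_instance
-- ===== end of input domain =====

-- B replaces A's O(total_pages) scan by a direct O(delta) construction: [1] ++ clamped window ++ [last], with None per gap.


-- ===== PORT A =====
-- the loop body of A (pages[-1] is only read in the else-branch; in Python it can only
-- be reached with pages nonempty, since p = 1 always appends first)
def pvStepA (page : Int) (total_pages : Int) (delta : Int)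
    (pages : List (Option Int)) (p : Int) : List (Option Int) :=
  if p = 1 ∨ p = total_pages ∨ |p - page| ≤ delta then
    pages ++ [some p]
  else
    if PySem.List.pyGet? pages (-1) ≠ some none then pages ++ [none] else pages

def gerar_paginacao (page : Int) (total_pages : Int) (delta : Int) : List (Option Int) :=
  (PySem.List.pyRange 1 (total_pages + 1) 1).foldl (pvStepA page total_pages delta) []

-- ===== PORT B =====
def gerar_paginacao_alt (page : Int) (total_pages : Int) (delta : Int) : List (Option Int) :=
  if total_pages < 1 then []
  else if total_pages = 1 then [some 1]
  else
    let lo := max 2 (page - delta)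
    let hi := min (total_pages - 1) (page + delta)
    let out : List (Option Int) := [some 1]
    let out :=
      if lo > hi then
        (if total_pages > 2 then out ++ [none] else out)
      else
        ((if lo > 2 then out ++ [none] else out)
          ++ (PySem.List.pyRange lo (hi + 1) 1).map some)
          ++ (if hi < total_pages - 1 then [none] else [])
    out ++ [some total_pages]

-- ===== PRECONDITION & SPEC =====
def Spec_gerar_paginacao (page : Int) (total_pages : Int) (delta : Int) (out : List (Option Int)) : Prop := out = gerar_paginacao_alt page total_pages delta
instance (page : Int) (total_pages : Int) (delta : Int) (out : List (Option Int)) : Decidable (Spec_gerar_paginacao page total_pages delta out) := by unfold Spec_gerar_paginacao; infer_instance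

-- ===== CLAIM (what is proved, stated in full; the proofs are below) =====
def Claim_equal_gerar_paginacao : Prop := ∀ (page : Int) (total_pages : Int) (delta : Int), Dom_gerar_paginacao page total_pages delta → Spec_gerar_paginacao page total_pages delta (gerar_paginacao page total_pages delta)

-- ===== LEMMAS AND PROOFS =====

-- folding A's step over a list of pages that all satisfy the keep-condition appends them all
theorem pv_fold_kept (page total_pages delta : Int) (l : List Int) (pages : List (Option Int))
    (h : ∀ p ∈ l, p = 1 ∨ p = total_pages ∨ |p - page| ≤ delta) :
    l.foldl (pvStepA page total_pages delta) pages = pages ++ l.map some := by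
  induction l generalizing pages with
  | nil => simp
  | cons p t ih =>
      have hp := h p (by simp)
      simp only [List.foldl_cons, pvStepA, if_pos hp, List.map_cons]
      rw [ih _ (fun q hq => h q (by simp [hq]))]
      simp

-- folding A's step over a list of skipped pages appends at most one None
theorem pv_fold_skipped (page total_pages delta : Int) (l : List Int) (pages : List (Option Int))
    (h : ∀ p ∈ l, ¬(p = 1 ∨ p = total_pages ∨ |p - page| ≤ delta)) :
    l.foldl (pvStepA page total_pages delta) pages =
      if l = [] then pages
      else if PySem.List.pyGet? pages (-1) ≠ some none then pages ++ [none] else pages := by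
  induction l generalizing pages with
  | nil => simp
  | cons p t ih =>
      have hp := h p (by simp)
      simp only [List.foldl_cons, pvStepA, if_neg hp]
      by_cases hlast : PySem.List.pyGet? pages (-1) ≠ some none
      · rw [if_pos hlast, ih _ (fun q hq => h q (by simp [hq]))]
        have : PySem.List.pyGet? (pages ++ [none]) (-1) = some none :=
          PySem.List.pyGet?_neg_one_append_singleton pages none
        simp [this]
      · rw [if_neg hlast, ih _ (fun q hq => h q (by simp [hq]))]
        simp [hlast]

theorem gerar_paginacao_eq (page total_pages delta : Int) :
    gerar_paginacao page total_pages delta = gerar_paginacao_alt page total_pages delta := by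
  unfold gerar_paginacao gerar_paginacao_alt
  by_cases h0 : total_pages < 1
  · rw [PySem.List.pyRange_one_eq_nil (by omega), if_pos h0]; rfl
  · rw [if_neg h0]
    by_cases h1 : total_pages = 1
    · subst h1
      rw [PySem.List.pyRange_one_cons (by norm_num),
          PySem.List.pyRange_one_eq_nil (a := 1+1) (b := 1+1) (by norm_num), if_pos rfl]
      simp [pvStepA]
    · rw [if_neg h1]
      have h2 : 2 ≤ total_pages := by omega
      simp only []   -- zeta-reduce the let-bindings of the B port
      generalize hgl : max 2 (page - delta) = lo
      generalize hgh : min (total_pages - 1) (page + delta) = hi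
      have hlo1 : 2 ≤ lo := hgl ▸ le_max_left _ _
      have hlo2 : page - delta ≤ lo := hgl ▸ le_max_right _ _
      have hlo3 : lo = 2 ∨ lo = page - delta := hgl ▸ max_choice _ _
      have hhi1 : hi ≤ total_pages - 1 := hgh ▸ min_le_left _ _
      have hhi2 : hi ≤ page + delta := hgh ▸ min_le_right _ _
      have hhi3 : hi = total_pages - 1 ∨ hi = page + delta := hgh ▸ min_choice _ _
      have hskip : ∀ p : Int, 2 ≤ p → p ≤ total_pages - 1 → (p < lo ∨ hi < p) →
          ¬(p = 1 ∨ p = total_pages ∨ |p - page| ≤ delta) := by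
        intro p hp1 hp2 hp3
        push_neg
        refine ⟨by omega, by omega, ?_⟩
        by_contra habs
        push_neg at habs
        rw [abs_le] at habs
        have hl : lo ≤ p := by rcases hlo3 with h | h <;> omega
        have hh : p ≤ hi := by rcases hhi3 with h | h <;> omega
        omega
      have hsplit1 : PySem.List.pyRange 1 (total_pages + 1) 1 =
          [(1 : Int)] ++ PySem.List.pyRange 2 total_pages 1 ++ [total_pages] := by
        rw [PySem.List.pyRange_one_append 1 2 (total_pages + 1) (by omega) (by omega),
            PySem.List.pyRange_one_append 2 total_pages (total_pages + 1) (by omega) (by omega),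
            PySem.List.pyRange_one_cons (a := 1) (b := 2) (by norm_num),
            PySem.List.pyRange_one_eq_nil (a := 1+1) (b := 2) (by norm_num),
            PySem.List.pyRange_one_singleton, ← List.append_assoc]
      rw [hsplit1, List.foldl_append, List.foldl_append]
      have step1 : List.foldl (pvStepA page total_pages delta) [] [1] = [some 1] := by
        simp [pvStepA]
      rw [step1]
      have stepN : ∀ s : List (Option Int),
          List.foldl (pvStepA page total_pages delta) s [total_pages] = s ++ [some total_pages] := by
        intro s; simp [pvStepA]
      rw [stepN]
      by_cases hwin : lo > hi
      · -- window empty: every p in 2..total_pages-1 is skipped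
        rw [if_pos hwin]
        rw [pv_fold_skipped page total_pages delta (PySem.List.pyRange 2 total_pages 1) [some 1]
          (fun p hp => by
            rw [PySem.List.mem_pyRange_one] at hp
            exact hskip p hp.1 (by omega) (by omega))]
        by_cases h3 : total_pages > 2
        · rw [if_neg (by rw [PySem.List.pyRange_one_cons (by omega)]; simp), if_pos h3,
              if_pos (by rw [PySem.List.pyGet?_neg_one]; simp)]
        · rw [if_pos (PySem.List.pyRange_one_eq_nil (by omega)), if_neg h3]
      · -- window nonempty
        push_neg at hwin
        rw [if_neg (by omega)]
        have hsplit2 : PySem.List.pyRange 2 total_pages 1 =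
            PySem.List.pyRange 2 lo 1 ++ PySem.List.pyRange lo (hi+1) 1 ++
              PySem.List.pyRange (hi+1) total_pages 1 := by
          rw [PySem.List.pyRange_one_append 2 lo total_pages (by omega) (by omega),
              PySem.List.pyRange_one_append lo (hi+1) total_pages (by omega) (by omega),
              List.append_assoc]
        rw [hsplit2, List.foldl_append, List.foldl_append]
        have hpre : List.foldl (pvStepA page total_pages delta) [some 1] (PySem.List.pyRange 2 lo 1) =
            (if lo > 2 then [some 1] ++ [none] else [some 1]) := by
          rw [pv_fold_skipped page total_pages delta (PySem.List.pyRange 2 lo 1) [some 1]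
            (fun p hp => by
              rw [PySem.List.mem_pyRange_one] at hp
              exact hskip p hp.1 (by omega) (by omega))]
          by_cases h3 : lo > 2
          · rw [if_neg (by rw [PySem.List.pyRange_one_cons (by omega)]; simp), if_pos h3,
                if_pos (by rw [PySem.List.pyGet?_neg_one]; simp)]
          · rw [if_pos (PySem.List.pyRange_one_eq_nil (by omega)), if_neg h3]
        rw [hpre]
        rw [pv_fold_kept page total_pages delta (PySem.List.pyRange lo (hi+1) 1)
          (if lo > 2 then [some 1] ++ [none] else [some 1])
          (fun p hp => by
            rw [PySem.List.mem_pyRange_one] at hp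
            right; right
            rw [abs_le]
            omega)]
        -- the window ends in some hi, so pages[-1] is not None afterwards
        have hwdecomp : (PySem.List.pyRange lo (hi+1) 1).map some =
            (PySem.List.pyRange lo hi 1).map some ++ [some hi] := by
          rw [PySem.List.pyRange_one_succ_right (by omega)]
          simp
        have hlastw : PySem.List.pyGet?
            ((if lo > 2 then [some 1] ++ [none] else ([some 1] : List (Option Int)))
              ++ (PySem.List.pyRange lo (hi+1) 1).map some) (-1) = some (some hi) := by
          rw [hwdecomp, ← List.append_assoc, PySem.List.pyGet?_neg_one_append_singleton]
        rw [pv_fold_skipped page total_pages delta (PySem.List.pyRange (hi+1) total_pages 1)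
          ((if lo > 2 then [some 1] ++ [none] else [some 1])
            ++ (PySem.List.pyRange lo (hi+1) 1).map some)
          (fun p hp => by
            rw [PySem.List.mem_pyRange_one] at hp
            exact hskip p (by omega) (by omega) (by omega))]
        by_cases h3 : hi < total_pages - 1
        · rw [if_neg (by rw [PySem.List.pyRange_one_cons (by omega)]; simp),
              if_pos (by rw [hlastw]; simp), if_pos h3]
        · rw [if_pos (PySem.List.pyRange_one_eq_nil (by omega)), if_neg h3]
          simp

-- ===== VERDICT (by name: the statement is the Claim_ definition above) =====
theorem gerar_paginacao_spec : Claim_equal_gerar_paginacao := by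
  intro page total_pages delta _
  exact gerar_paginacao_eq page total_pages delta
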